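-- pv_equiv track=rewrite | github.com/trungkiengrxer/Python | Frame.py | frameList
-- ===== SOURCE A (Python) =====
-- def frameList(num, size, frameLength, frameOverlap):
--     frameList = []
--     for i in range(0, size, frameLength - frameOverlap):
--         frameList.append(num[i : i + frameLength])
--         if len(frameList[-1]) < frameLength:
--             for i in range(len(frameList[-1]), frameLength):
--                 frameList[-1].append(0)
--     return frameList
-- ===== SOURCE B (Python) =====
-- def frameList(num, size, frameLength, frameOverlap):
--     starts = range(0, size, frameLength - frameOverlap)
--     if not starts:
--         return []
--     padded = num + [0] * (size + frameLength)
--     return [padded[i:i + frameLength] for i in starts]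
-- ===== Notes on version B (the rewrite author's own statement) =====
-- stated objective: alternative
-- what changed: Computes the start range once, and hoists A's per-frame conditional zero-padding loop into a single zero-padded buffer (padded = num + [0]*(size + frameLength)) built once, then emits uniform full-length slices of it; Pre_ excludes frameLength == frameOverlap (A's range(0, size, 0) raises ValueError) and the meaningless framings that still emit frames (negative frameLength with positive size, or a backward step into negative size), where A's slices are accidents of negative-index wraparound that B's padded buffer reproduces differently.
-- outside the precondition, e.g. on frameList([1, 2, 3], 4, -1, -3): A returns [[1, 2], []], B returns [[1, 2, 3, 0, 0], []]; on frameList([1, 2], -2, 2, 3): A returns [[1, 2], [0, 0]], B returns [[1, 2], []]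
import Mathlib
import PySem

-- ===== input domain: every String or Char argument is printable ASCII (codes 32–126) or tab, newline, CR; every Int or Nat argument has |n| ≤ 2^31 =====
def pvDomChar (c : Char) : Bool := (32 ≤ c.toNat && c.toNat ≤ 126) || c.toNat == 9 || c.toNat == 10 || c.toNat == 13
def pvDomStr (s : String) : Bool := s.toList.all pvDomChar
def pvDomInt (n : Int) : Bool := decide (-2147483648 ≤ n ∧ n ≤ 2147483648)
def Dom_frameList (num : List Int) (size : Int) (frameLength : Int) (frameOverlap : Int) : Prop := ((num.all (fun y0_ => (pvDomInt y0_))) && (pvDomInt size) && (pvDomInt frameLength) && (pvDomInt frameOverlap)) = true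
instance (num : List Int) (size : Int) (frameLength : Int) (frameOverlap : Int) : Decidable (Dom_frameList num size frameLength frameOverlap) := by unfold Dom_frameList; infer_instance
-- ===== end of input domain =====

-- B hoists A's per-frame conditional zero-padding loop into one zero-padded buffer built once,
-- then takes uniform full-length slices (alternative decomposition, same asymptotic cost);
-- A = B on Pre_ (every input where A returns without raising or producing frames through
-- negative-index wraparound).


-- ===== PORT A =====
-- for i in range(0, size, frameLength - frameOverlap):
--   append num[i : i + frameLength]; if the frame is short, an inner loop appends zeros up to frameLength
def frameList (num : List Int) (size : Int) (frameLength : Int) (frameOverlap : Int) : List (List Int) :=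
  (PySem.List.pyRange 0 size (frameLength - frameOverlap)).foldl
    (fun acc i =>
      let frame := PySem.List.slice num (some i) (some (i + frameLength))
      let frame :=
        if (frame.length : Int) < frameLength then
          (PySem.List.pyRange (frame.length : Int) frameLength 1).foldl (fun fr _ => fr ++ [(0 : Int)]) frame
        else frame
      acc ++ [frame]) []

-- ===== PORT B =====
-- starts = range(0, size, frameLength - frameOverlap); if empty: no frames;
-- else padded = num + [0] * (size + frameLength), one uniform slice per start
def frameList_alt (num : List Int) (size : Int) (frameLength : Int) (frameOverlap : Int) : List (List Int) :=
  let starts := PySem.List.pyRange 0 size (frameLength - frameOverlap)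
  if starts = [] then []
  else
    let padded := num ++ List.replicate (size + frameLength).toNat (0 : Int)
    starts.map (fun i => PySem.List.slice padded (some i) (some (i + frameLength)))

-- ===== PRECONDITION & SPEC =====
-- Pre_ excludes frameLength = frameOverlap, where A's range(0, size, 0) raises ValueError, and the
-- meaningless framings that still emit frames — a negative frameLength with positive size, or a
-- backward step (frameLength < frameOverlap) into negative size — where A's slices are accidents of
-- Python's negative-index wraparound that B's padded buffer reproduces differently.
def Pre_frameList (num : List Int) (size : Int) (frameLength : Int) (frameOverlap : Int) : Prop :=
  frameLength ≠ frameOverlap ∧ (frameOverlap < frameLength → 0 ≤ frameLength ∨ size ≤ 0)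
    ∧ (frameLength < frameOverlap → 0 ≤ size)
instance (num : List Int) (size : Int) (frameLength : Int) (frameOverlap : Int) : Decidable (Pre_frameList num size frameLength frameOverlap) := by unfold Pre_frameList; infer_instance

def pvWitness_frameList : List Int × Int × Int × Int := ([1, 2, 3, 4, 5], 5, 3, 1)

def Spec_frameList (num : List Int) (size : Int) (frameLength : Int) (frameOverlap : Int) (out : List (List Int)) : Prop := out = frameList_alt num size frameLength frameOverlap
instance (num : List Int) (size : Int) (frameLength : Int) (frameOverlap : Int) (out : List (List Int)) : Decidable (Spec_frameList num size frameLength frameOverlap out) := by unfold Spec_frameList; infer_instance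

-- ===== CLAIM =====
def Claim_equal_frameList : Prop := ∀ (num : List Int) (size : Int) (frameLength : Int) (frameOverlap : Int), Dom_frameList num size frameLength frameOverlap → Pre_frameList num size frameLength frameOverlap → Spec_frameList num size frameLength frameOverlap (frameList num size frameLength frameOverlap)

-- ===== LEMMAS AND PROOFS =====

-- the frame A produces at start index i: the slice, zero-padded to frameLength
def pvFrame (num : List Int) (frameLength : Int) (i : Int) : List Int :=
  let chunk := PySem.List.slice num (some i) (some (i + frameLength))
  chunk ++ List.replicate (frameLength - (chunk.length : Int)).toNat 0

-- A's per-index frame (slice, then the conditional zero-appending loop) is pvFrame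
lemma frameA_eq_pvFrame (num : List Int) (frameLength i : Int) :
    (let frame := PySem.List.slice num (some i) (some (i + frameLength))
     if (frame.length : Int) < frameLength then
       (PySem.List.pyRange (frame.length : Int) frameLength 1).foldl (fun fr _ => fr ++ [(0 : Int)]) frame
     else frame) = pvFrame num frameLength i := by
  simp only [pvFrame]
  set chunk := PySem.List.slice num (some i) (some (i + frameLength)) with hc
  split_ifs with h
  · have he : (fun (fr : List Int) (_ : Int) => fr ++ [(0 : Int)])
        = fun (fr : List Int) (x : Int) => fr ++ [(fun _ => (0 : Int)) x] := rfl
    rw [he, PySem.List.foldl_append_singleton_eq_map, List.map_const',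
        PySem.List.length_pyRange_one]
  · have hz : (frameLength - (chunk.length : Int)).toNat = 0 := by omega
    simp [hz]

-- range(0, size, s) with s < 0 and 0 ≤ size is empty
lemma pyRange_neg_empty (size s : Int) (hs : s < 0) (hsize : 0 ≤ size) :
    PySem.List.pyRange 0 size s = [] := by
  unfold PySem.List.pyRange
  rw [if_neg (show ¬ s = 0 by omega)]
  simp only [if_neg (show ¬ (0 : Int) < s by omega), if_neg (show ¬ size < 0 by omega)]
  simp

-- a window of the zero-padded buffer is the bare window zero-padded to full width
lemma pad_slice (xs : List Int) (p a b : Nat) (h : a + b ≤ xs.length + p) :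
    List.take b (List.drop a (xs ++ List.replicate p (0 : Int)))
      = List.take b (List.drop a xs)
          ++ List.replicate (b - (List.take b (List.drop a xs)).length) 0 := by
  rw [List.drop_append, List.drop_replicate, List.take_append, List.take_replicate]
  congr 1
  rw [List.length_take, List.length_drop]
  congr 1
  rcases Nat.le_total a xs.length with hal | hal
  · rcases Nat.le_total b (xs.length - a) with hb | hb <;> omega
  · omega

-- at every start index in range(0, size, step) the two frames agree (inside Pre_)
lemma frame_eq_padded (num : List Int) (size frameLength i : Int)
    (hfl : 0 ≤ frameLength) (hi : 0 ≤ i) (hisize : i < size) :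
    pvFrame num frameLength i
      = PySem.List.slice (num ++ List.replicate (size + frameLength).toNat (0 : Int))
          (some i) (some (i + frameLength)) := by
  have hb : (i + frameLength).toNat - i.toNat = frameLength.toNat := by omega
  rw [pvFrame, PySem.List.slice_toNat num hi (by omega), hb,
      PySem.List.slice_toNat _ hi (by omega), hb,
      pad_slice num ((size + frameLength).toNat) i.toNat frameLength.toNat (by omega)]
  congr 1
  rw [List.length_take, List.length_drop]
  congr 1
  rcases Nat.le_total frameLength.toNat (num.length - i.toNat) with hm | hm <;> omega

-- ===== VERDICT =====
theorem frameList_spec : Claim_equal_frameList := by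
  intro num size frameLength frameOverlap _ hpre
  obtain ⟨hne, hfwd, hbwd⟩ := hpre
  unfold Spec_frameList frameList frameList_alt
  have hfun : (fun (acc : List (List Int)) (i : Int) =>
      let frame := PySem.List.slice num (some i) (some (i + frameLength))
      let frame :=
        if (frame.length : Int) < frameLength then
          (PySem.List.pyRange (frame.length : Int) frameLength 1).foldl (fun fr _ => fr ++ [(0 : Int)]) frame
        else frame
      acc ++ [frame]) = fun acc i => acc ++ [pvFrame num frameLength i] := by
    funext acc i
    exact congrArg (fun l => acc ++ [l]) (frameA_eq_pvFrame num frameLength i)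
  rw [hfun, PySem.List.foldl_append_singleton_eq_map, List.nil_append]
  by_cases hemp : PySem.List.pyRange 0 size (frameLength - frameOverlap) = []
  · rw [hemp]
    simp
  · rw [if_neg hemp]
    have hpos : 0 < frameLength - frameOverlap := by
      rcases lt_or_gt_of_ne (fun h => hne (by omega) : frameLength - frameOverlap ≠ 0) with hneg | hpos
      · exact absurd (pyRange_neg_empty size _ hneg (hbwd (by omega))) hemp
      · exact hpos
    have hfl : 0 ≤ frameLength := by
      rcases hfwd (by omega) with h | h
      · exact h
      · refine absurd ?_ hemp
        rw [PySem.List.pyRange_of_pos 0 size hpos, if_neg (show ¬ (0 : Int) < size by omega)]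
        simp
    apply List.map_congr_left
    intro i hi
    rw [PySem.List.mem_pyRange_iff_of_pos hpos] at hi
    exact frame_eq_padded num size frameLength i hfl hi.1 hi.2.1
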